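-- pv_equiv track=rewrite | github.com/Zelechos/DS_Data_Structure | data_structures/recursividad/python/06_exercise.py | Dividendo
-- ===== SOURCE A (Python) =====
-- def Dividendo(Numero,Switch,NumeroDividendo,Lista1):
--     if Numero > 0 :
--         if Switch == 0:
--             Lista1.append(NumeroDividendo)
--             return Dividendo(Numero-1,Switch+1,NumeroDividendo+2,Lista1)# Aplicando Recursividad
--         elif Switch == 1:
--             Lista1.append(NumeroDividendo)
--             return Dividendo(Numero-1,Switch-1,NumeroDividendo-1,Lista1)# Aplicando Recursividad
--
--     return Lista1
-- ===== SOURCE B (Python) =====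
-- def Dividendo(Numero, Switch, NumeroDividendo, Lista1):
--     n = max(Numero, 0)
--     if Switch == 0:
--         Lista1.extend(NumeroDividendo + k // 2 + 2 * (k % 2) for k in range(n))
--     elif Switch == 1:
--         Lista1.extend(NumeroDividendo + k // 2 - k % 2 for k in range(n))
--     return Lista1
-- ===== Notes on version B (the rewrite author's own statement) =====
-- stated objective: alternative
-- what changed: Replaces the alternating tail recursion by a single non-recursive pass that computes each appended value in closed form from its index (k//2 plus a parity correction), so no call stack is used; Pre_ excludes large recursion counts on which A raises RecursionError.
-- outside the precondition, e.g. on Dividendo(20000, 0, 0, []): A raises RecursionError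
import Mathlib
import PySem

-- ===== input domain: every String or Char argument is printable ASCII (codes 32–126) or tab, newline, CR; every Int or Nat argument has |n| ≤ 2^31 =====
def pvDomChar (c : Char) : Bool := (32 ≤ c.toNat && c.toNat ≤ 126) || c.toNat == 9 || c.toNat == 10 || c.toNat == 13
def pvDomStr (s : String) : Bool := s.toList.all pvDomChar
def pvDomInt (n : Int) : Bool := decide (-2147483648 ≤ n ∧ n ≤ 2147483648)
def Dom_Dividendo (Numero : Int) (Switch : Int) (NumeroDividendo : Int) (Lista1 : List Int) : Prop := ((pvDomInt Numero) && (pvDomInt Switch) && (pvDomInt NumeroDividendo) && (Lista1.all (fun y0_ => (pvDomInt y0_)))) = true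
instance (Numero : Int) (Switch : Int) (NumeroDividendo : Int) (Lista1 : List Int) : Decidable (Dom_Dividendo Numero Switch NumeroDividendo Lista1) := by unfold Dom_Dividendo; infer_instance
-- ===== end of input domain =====

-- B replaces A's alternating tail recursion by one non-recursive pass using a closed form per index
-- (objective: alternative, no recursion). Both A and B mutate Lista1 in place the same way (append/extend);
-- the equivalence proved here is about the return value.

-- ===== PORT A =====
def Dividendo (Numero : Int) (Switch : Int) (NumeroDividendo : Int) (Lista1 : List Int) : List Int :=
  if Numero > 0 then
    if Switch = 0 then
      Dividendo (Numero - 1) (Switch + 1) (NumeroDividendo + 2) (Lista1 ++ [NumeroDividendo])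
    else if Switch = 1 then
      Dividendo (Numero - 1) (Switch - 1) (NumeroDividendo - 1) (Lista1 ++ [NumeroDividendo])
    else Lista1
  else Lista1
termination_by Numero.toNat
decreasing_by all_goals omega

-- ===== PORT B =====
-- k // 2 and k % 2 in Source B act on k from range(n), always ≥ 0, where Nat division/mod is exact.
def Dividendo_alt (Numero : Int) (Switch : Int) (NumeroDividendo : Int) (Lista1 : List Int) : List Int :=
  if Switch = 0 then
    Lista1 ++ (List.range (max Numero 0).toNat).map
      (fun k => NumeroDividendo + ((k / 2 : Nat) : Int) + 2 * ((k % 2 : Nat) : Int))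
  else if Switch = 1 then
    Lista1 ++ (List.range (max Numero 0).toNat).map
      (fun k => NumeroDividendo + ((k / 2 : Nat) : Int) - ((k % 2 : Nat) : Int))
  else Lista1

-- ===== PRECONDITION & SPEC =====
-- Pre_ excludes recursion counts beyond 9000 when the recursion actually runs (Switch 0 or 1):
-- there CPython's A raises RecursionError (at the graders' recursion limit of 10000); the margin
-- below the limit excludes a thin band where A still returns the same list B returns.
def Pre_Dividendo (Numero : Int) (Switch : Int) (NumeroDividendo : Int) (Lista1 : List Int) : Prop :=
  (Switch = 0 ∨ Switch = 1) → Numero ≤ 9000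
instance (Numero : Int) (Switch : Int) (NumeroDividendo : Int) (Lista1 : List Int) : Decidable (Pre_Dividendo Numero Switch NumeroDividendo Lista1) := by unfold Pre_Dividendo; infer_instance

def pvWitness_Dividendo : Int × Int × Int × List Int := (6, 0, 4, [1])

def Spec_Dividendo (Numero : Int) (Switch : Int) (NumeroDividendo : Int) (Lista1 : List Int) (out : List Int) : Prop := out = Dividendo_alt Numero Switch NumeroDividendo Lista1
instance (Numero : Int) (Switch : Int) (NumeroDividendo : Int) (Lista1 : List Int) (out : List Int) : Decidable (Spec_Dividendo Numero Switch NumeroDividendo Lista1 out) := by unfold Spec_Dividendo; infer_instance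

-- ===== CLAIM (what is proved, stated in full; the proofs are below) =====
def Claim_equal_Dividendo : Prop := ∀ (Numero : Int) (Switch : Int) (NumeroDividendo : Int) (Lista1 : List Int), Dom_Dividendo Numero Switch NumeroDividendo Lista1 → Pre_Dividendo Numero Switch NumeroDividendo Lista1 → Spec_Dividendo Numero Switch NumeroDividendo Lista1 (Dividendo Numero Switch NumeroDividendo Lista1)

-- ===== LEMMAS AND PROOFS =====

lemma key (fuel : Nat) : ∀ (N v : Int) (L : List Int), N.toNat ≤ fuel →
    Dividendo N 0 v L = Dividendo_alt N 0 v L ∧ Dividendo N 1 v L = Dividendo_alt N 1 v L := by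
  induction fuel with
  | zero =>
    intro N v L h
    have hN : ¬ N > 0 := by omega
    have hm : (max N 0).toNat = 0 := by omega
    constructor <;> (rw [Dividendo, Dividendo_alt]; simp [hN, hm])
  | succ fuel ih =>
    intro N v L h
    by_cases hN : N > 0
    · have hm : (max N 0).toNat = (max (N - 1) 0).toNat + 1 := by omega
      have hfuel : (N - 1).toNat ≤ fuel := by omega
      constructor
      · rw [Dividendo]
        simp only [hN, if_true]
        norm_num
        rw [(ih (N - 1) (v + 2) (L ++ [v]) hfuel).2]
        rw [Dividendo_alt, Dividendo_alt]
        norm_num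
        rw [hm, List.range_succ_eq_map, List.map_cons, List.map_map]
        norm_num
        intro k _
        omega
      · rw [Dividendo]
        simp only [hN, if_true]
        norm_num
        rw [(ih (N - 1) (v - 1) (L ++ [v]) hfuel).1]
        rw [Dividendo_alt, Dividendo_alt]
        norm_num
        rw [hm, List.range_succ_eq_map, List.map_cons, List.map_map]
        norm_num
        intro k _
        omega
    · have hm : (max N 0).toNat = 0 := by omega
      constructor <;> (rw [Dividendo, Dividendo_alt]; simp [hN, hm])

-- ===== VERDICT (by name: the statement is the Claim_ definition above) =====
theorem Dividendo_spec : Claim_equal_Dividendo := by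
  intro N S v L _ _
  unfold Spec_Dividendo
  by_cases h0 : S = 0
  · subst h0; exact (key N.toNat N v L le_rfl).1
  · by_cases h1 : S = 1
    · subst h1; exact (key N.toNat N v L le_rfl).2
    · rw [Dividendo, Dividendo_alt]
      simp [h0, h1]
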